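-- pv_equiv track=rewrite | github.com/Radicalscale/virevo | test_call_flow_path.py | get_node_goal
-- ===== SOURCE A (Python) =====
-- from typing import Optional, List, Dict, Any
--
-- def get_node_goal(node: Dict) -> str:
--     """Extract the node's stated goal"""
--     data = node.get('data', {})
--     goal = data.get('goal', '')
--     if goal:
--         return goal
--
--     # Try to extract from content
--     content = data.get('content', '') or data.get('script', '')
--     if '## Primary Goal' in content:
--         lines = content.split('\n')
--         for i, line in enumerate(lines):
--             if '## Primary Goal' in line and i + 1 < len(lines):
--                 return lines[i + 1].strip()
--
--     return "(No explicit goal defined)"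
-- ===== SOURCE B (Python) =====
-- def get_node_goal(node):
--     """Extract the node's stated goal"""
--     data = node.get('data', {})
--     goal = data.get('goal', '')
--     if goal:
--         return goal
--
--     # Work on the raw string: locate the first marker occurrence, then the
--     # newline ending that line, then the end of the following line.
--     content = data.get('content', '') or data.get('script', '')
--     p = content.find('## Primary Goal')
--     if p != -1:
--         nl = content.find('\n', p)
--         if nl != -1:
--             end = content.find('\n', nl + 1)
--             nxt = content[nl + 1:] if end == -1 else content[nl + 1:end]
--             return nxt.strip()
--     return "(No explicit goal defined)"
-- ===== Notes on version B (the rewrite author's own statement) =====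
-- stated objective: alternative
-- what changed: B never splits the content into a list of lines and never loops over them: it locates the first marker occurrence with str.find, then the newline ending that line and the newline ending the next line with str.find(sub, start), and slices the next line directly out of the raw string.
import Mathlib
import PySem

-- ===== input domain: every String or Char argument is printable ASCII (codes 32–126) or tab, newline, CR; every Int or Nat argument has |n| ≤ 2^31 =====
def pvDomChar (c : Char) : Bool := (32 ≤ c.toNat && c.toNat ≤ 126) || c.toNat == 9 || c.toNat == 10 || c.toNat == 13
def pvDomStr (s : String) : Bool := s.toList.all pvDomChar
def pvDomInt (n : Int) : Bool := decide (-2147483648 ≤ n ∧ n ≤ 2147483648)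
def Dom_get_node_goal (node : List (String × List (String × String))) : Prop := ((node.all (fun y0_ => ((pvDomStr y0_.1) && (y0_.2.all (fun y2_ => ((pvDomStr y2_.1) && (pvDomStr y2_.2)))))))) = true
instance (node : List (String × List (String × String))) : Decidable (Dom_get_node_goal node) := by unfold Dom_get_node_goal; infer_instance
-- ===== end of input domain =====

-- B never builds the line list: it finds the marker and the two following
-- newlines directly in the raw string and slices the next line out (alternative
-- decomposition, same cost).

-- ===== PORT A =====
-- A's 'for i, line in enumerate(lines): if marker in line and i+1 < len(lines): return lines[i+1].strip()'
def pvLoopA (lines : List String) : List (Int × String) → Option String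
  | [] => none
  | (i, line) :: rest =>
    if PySem.Str.isIn "## Primary Goal" line && decide (i + 1 < (lines.length : Int)) then
      some (PySem.Str.strip (PySem.List.pyGetD lines (i + 1) ""))
    else
      pvLoopA lines rest

def get_node_goal (node : List (String × List (String × String))) : String :=
  let data := (PySem.Dict.mk node).getD "data" []
  let goal := (PySem.Dict.mk data).getD "goal" ""
  if goal ≠ "" then goal
  else
    let c := (PySem.Dict.mk data).getD "content" ""
    let content := if c ≠ "" then c else (PySem.Dict.mk data).getD "script" ""
    if PySem.Str.isIn "## Primary Goal" content then
      let lines := (PySem.Str.split? content "\n").getD []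
      match pvLoopA lines (PySem.List.enumerate lines 0) with
      | some r => r
      | none => "(No explicit goal defined)"
    else "(No explicit goal defined)"

-- ===== PORT B =====
-- p = content.find(marker); nl = content.find('\n', p); end = content.find('\n', nl+1);
-- nxt = content[nl+1:] if end == -1 else content[nl+1:end]; return nxt.strip()
def get_node_goal_alt (node : List (String × List (String × String))) : String :=
  let data := (PySem.Dict.mk node).getD "data" []
  let goal := (PySem.Dict.mk data).getD "goal" ""
  if goal ≠ "" then goal
  else
    let c := (PySem.Dict.mk data).getD "content" ""
    let content := if c ≠ "" then c else (PySem.Dict.mk data).getD "script" ""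
    let p := PySem.Str.find content "## Primary Goal"
    if p ≠ -1 then
      let nl := PySem.Str.findFrom content "\n" p
      if nl ≠ -1 then
        let e := PySem.Str.findFrom content "\n" (nl + 1)
        PySem.Str.strip
          (if e = -1 then PySem.Str.slice content (some (nl + 1)) none
           else PySem.Str.slice content (some (nl + 1)) (some e))
      else "(No explicit goal defined)"
    else "(No explicit goal defined)"

-- ===== PRECONDITION & SPEC =====
def Spec_get_node_goal (node : List (String × List (String × String))) (out : String) : Prop := out = get_node_goal_alt node
instance (node : List (String × List (String × String))) (out : String) : Decidable (Spec_get_node_goal node out) := by unfold Spec_get_node_goal; infer_instance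

-- ===== CLAIM (what is proved, stated in full; the proofs are below) =====
def Claim_equal_get_node_goal : Prop := ∀ (node : List (String × List (String × String))), Dom_get_node_goal node → Spec_get_node_goal node (get_node_goal node)

-- ===== LEMMAS AND PROOFS =====

-- The marker, as a char list.
def pvM : List Char := "## Primary Goal".toList

-- Char-level views of the two inner computations (after the shared glue).
def pvAinner (cs : List Char) : Option (List Char) :=
  (((PySem.Chars.splitOn cs ['\n']).zip (PySem.Chars.splitOn cs ['\n']).tail).find?
    (fun p => PySem.Chars.isIn pvM p.1)).map (fun p => PySem.Chars.strip p.2)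

def pvBinner (cs : List Char) : Option (List Char) :=
  if PySem.Chars.find cs pvM = -1 then none
  else if PySem.Chars.findFrom cs ['\n'] (PySem.Chars.find cs pvM) = -1 then none
  else
    some (PySem.Chars.strip
      (if PySem.Chars.findFrom cs ['\n']
            (PySem.Chars.findFrom cs ['\n'] (PySem.Chars.find cs pvM) + 1) = -1 then
        PySem.List.slice cs (some (PySem.Chars.findFrom cs ['\n'] (PySem.Chars.find cs pvM) + 1)) none
       else
        PySem.List.slice cs (some (PySem.Chars.findFrom cs ['\n'] (PySem.Chars.find cs pvM) + 1))
          (some (PySem.Chars.findFrom cs ['\n']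
            (PySem.Chars.findFrom cs ['\n'] (PySem.Chars.find cs pvM) + 1)))))

-- A's loop, characterised as a first-match scan over adjacent line pairs.
lemma pvLoopA_eq_zip (suf : List String) : ∀ pre : List String,
    pvLoopA (pre ++ suf) (PySem.List.enumerate suf (pre.length : Int)) =
      ((suf.zip suf.tail).find? (fun p => PySem.Str.isIn "## Primary Goal" p.1)).map
        (fun p => PySem.Str.strip p.2) := by
  induction suf with
  | nil => intro pre; simp [pvLoopA, PySem.List.enumerate]
  | cons line rest ih =>
    intro pre
    rw [PySem.List.enumerate_cons]
    unfold pvLoopA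
    simp only [List.tail_cons]
    have hrec := ih (pre ++ [line])
    simp only [List.append_assoc, List.singleton_append, List.length_append,
      List.length_singleton, Nat.cast_add, Nat.cast_one] at hrec
    cases hm : PySem.Str.isIn "## Primary Goal" line with
    | false =>
      rw [if_neg (by simp), hrec]
      cases rest with
      | nil => simp
      | cons y r' =>
        rw [List.zip_cons_cons, List.find?_cons_of_neg (by simpa using hm)]
        simp
    | true =>
      cases rest with
      | nil =>
        have hlen : ¬ ((pre.length : Int) + 1 < ((pre ++ [line]).length : Int)) := by
          simp [List.length_append]
        rw [if_neg (by simp), hrec]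
        simp
      | cons y r' =>
        have hlen : ((pre.length : Int) + 1 < ((pre ++ line :: y :: r').length : Int)) := by
          simp [List.length_append]
        rw [if_pos (by simp)]
        have hget : PySem.List.pyGetD (pre ++ line :: y :: r') ((pre.length : Int) + 1) "" = y := by
          have hc : ((pre.length : Int) + 1) = ((pre.length + 1 : Nat) : Int) := by push_cast; ring
          rw [hc, PySem.List.pyGetD_natCast]
          have h1 : (pre ++ line :: y :: r').getD (pre.length + 1) "" =
              (pre ++ line :: y :: r')[pre.length + 1]'(by simp [List.length_append]) := by
            rw [List.getD_eq_getElem?_getD, List.getElem?_eq_getElem (by simp [List.length_append])]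
            rfl
          rw [h1, List.getElem_append_right (by omega)]
          simp
        rw [hget, List.zip_cons_cons, List.find?_cons_of_pos (by simpa using hm)]
        rfl

-- go-level structure of splitOn on a single-char separator
lemma pvGoAcc (c : Char) : ∀ (fuel : Nat) (l cur : List Char) (acc : List (List Char)),
    PySem.Chars.splitOn.go [c] fuel l cur acc = acc.reverse ++ PySem.Chars.splitOn.go [c] fuel l cur [] := by
  intro fuel
  induction fuel with
  | zero => intro l cur acc; simp [PySem.Chars.splitOn.go]
  | succ f ih =>
    intro l cur acc
    cases l with
    | nil => simp [PySem.Chars.splitOn.go]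
    | cons ch rest =>
      rw [PySem.Chars.splitOn.go, PySem.Chars.splitOn.go]
      by_cases hp : [c].isPrefixOf (ch :: rest) = true
      · rw [if_pos hp, if_pos hp, ih _ _ (cur.reverse :: acc), ih _ _ ([cur.reverse])]
        simp
      · rw [if_neg hp, if_neg hp, ih _ _ acc]

lemma pvGoNoSep (c : Char) : ∀ (fuel : Nat) (l cur : List Char) (acc : List (List Char)),
    l.length < fuel → c ∉ l →
    PySem.Chars.splitOn.go [c] fuel l cur acc = acc.reverse ++ [cur.reverse ++ l] := by
  intro fuel
  induction fuel with
  | zero => intro l cur acc h _; exact absurd h (Nat.not_lt_zero _)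
  | succ f ih =>
    intro l cur acc hlen hmem
    cases l with
    | nil => simp [PySem.Chars.splitOn.go]
    | cons ch rest =>
      rw [PySem.Chars.splitOn.go]
      have hp : [c].isPrefixOf (ch :: rest) = false := by
        simp [List.isPrefixOf]
        intro hc; exact hmem (by simp [hc])
      rw [if_neg (by simp [hp])]
      rw [ih rest (ch :: cur) acc (by simpa using Nat.lt_of_succ_lt_succ hlen) (fun h => hmem (List.mem_cons_of_mem _ h))]
      simp

lemma pvGoFuel (c : Char) : ∀ (fuel fuel' : Nat) (l cur : List Char) (acc : List (List Char)),
    l.length < fuel → l.length < fuel' →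
    PySem.Chars.splitOn.go [c] fuel l cur acc = PySem.Chars.splitOn.go [c] fuel' l cur acc := by
  intro fuel
  induction fuel with
  | zero => intro _ l _ _ h; omega
  | succ f ih =>
    intro fuel' l cur acc hl hl'
    cases l with
    | nil =>
      cases fuel' with
      | zero => omega
      | succ f' => simp [PySem.Chars.splitOn.go]
    | cons ch rest =>
      cases fuel' with
      | zero => simp at hl'
      | succ f' =>
        rw [PySem.Chars.splitOn.go, PySem.Chars.splitOn.go]
        by_cases hp : [c].isPrefixOf (ch :: rest) = true
        · rw [if_pos hp, if_pos hp]
          simp only [List.length_singleton, List.drop_one, List.tail_cons]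
          exact ih f' _ _ _ (by simp at hl; omega) (by simp at hl'; omega)
        · rw [if_neg hp, if_neg hp]
          exact ih f' _ _ _ (by simp at hl ⊢; omega) (by simp at hl' ⊢; omega)

lemma pvGoStep (c : Char) : ∀ (l : List Char) (fuel : Nat) (rest cur : List Char) (acc : List (List Char)),
    c ∉ l → (l ++ c :: rest).length < fuel →
    PySem.Chars.splitOn.go [c] fuel (l ++ c :: rest) cur acc =
      PySem.Chars.splitOn.go [c] (rest.length + 1) rest [] ((cur.reverse ++ l) :: acc) := by
  intro l
  induction l with
  | nil =>
    intro fuel rest cur acc _ hlen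
    cases fuel with
    | zero => simp at hlen
    | succ f =>
      rw [List.nil_append, PySem.Chars.splitOn.go]
      rw [if_pos (by simp [List.isPrefixOf])]
      simp only [List.length_singleton, List.drop_one, List.tail_cons, List.append_nil]
      exact pvGoFuel c f (rest.length+1) rest [] _ (by simp at hlen; omega) (by omega)
  | cons ch l' ih =>
    intro fuel rest cur acc hmem hlen
    cases fuel with
    | zero => simp at hlen
    | succ f =>
      rw [List.cons_append, PySem.Chars.splitOn.go]
      rw [if_neg (by simp [List.isPrefixOf]; intro h; exact hmem (by simp [h]))]
      rw [ih f rest (ch :: cur) acc (fun h => hmem (List.mem_cons_of_mem _ h)) (by simp at hlen ⊢; omega)]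
      simp

lemma pvSplit_no_sep (c : Char) (s : List Char) (h : c ∉ s) :
    PySem.Chars.splitOn s [c] = [s] := by
  unfold PySem.Chars.splitOn
  rw [pvGoNoSep c _ _ _ _ (by omega) h]
  simp

lemma pvSplit_cons (c : Char) (l rest : List Char) (h : c ∉ l) :
    PySem.Chars.splitOn (l ++ c :: rest) [c] = l :: PySem.Chars.splitOn rest [c] := by
  unfold PySem.Chars.splitOn
  rw [pvGoStep c l _ rest [] [] h (by simp)]
  rw [pvGoAcc]
  simp

lemma pvFind_eq_of (s m : List Char) (k : Nat)
    (h1 : m <+: s.drop k) (h2 : ∀ i < k, ¬ m <+: s.drop i) :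
    PySem.Chars.find s m = (k : Int) := by
  have hinf : m <:+: s := (h1.isInfix).trans (List.drop_suffix k s).isInfix
  have hnn : 0 ≤ PySem.Chars.find s m := (PySem.Chars.find_nonneg_iff s m).2 hinf
  obtain ⟨hp, hmin⟩ := PySem.Chars.find_spec hnn
  have : (PySem.Chars.find s m).toNat = k := by
    rcases Nat.lt_trichotomy (PySem.Chars.find s m).toNat k with h | h | h
    · exact absurd hp (h2 _ h)
    · exact h
    · exact absurd h1 (hmin k h)
  omega

lemma pvFind_char_none (c : Char) (s : List Char) (h : c ∉ s) :
    PySem.Chars.find s [c] = -1 := by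
  rw [PySem.Chars.find_eq_neg_one_iff]
  intro hinf
  exact h (hinf.subset (by simp))

lemma pvFind_char_append (c : Char) (a rest : List Char) (h : c ∉ a) :
    PySem.Chars.find (a ++ c :: rest) [c] = (a.length : Int) := by
  apply pvFind_eq_of
  · rw [List.drop_append_of_le_length (le_refl _)] -- maybe wrong name
    simp
  · intro i hi hpre
    have hdi : (a ++ c :: rest).drop i = a.drop i ++ c :: rest :=
      List.drop_append_of_le_length (by omega)
    rw [hdi] at hpre
    obtain ⟨x, xs, hd⟩ := List.exists_cons_of_ne_nil
      (List.ne_nil_of_length_pos (by simp; omega : 0 < (a.drop i).length))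
    rw [hd, List.cons_append] at hpre
    have hx : c = x := (List.cons_prefix_cons.mp hpre).1
    exact h ((List.drop_sublist i a).subset (by rw [hd, hx]; exact List.mem_cons_self ..))

lemma pvPrefix_cases (m l rest : List Char) (hm : '\n' ∉ m) (hl : ¬ m <:+: l)
    (i : Nat) (h : m <+: (l ++ '\n' :: rest).drop i) :
    l.length + 1 ≤ i ∧ m <+: rest.drop (i - (l.length + 1)) := by
  rcases Nat.lt_or_ge i (l.length + 1) with hi | hi
  · exfalso
    have hdi : (l ++ '\n' :: rest).drop i = l.drop i ++ '\n' :: rest :=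
      List.drop_append_of_le_length (by omega)
    rw [hdi] at h
    rcases le_or_gt (i + m.length) l.length with hfit | hstr
    · apply hl
      have hmlen : m.length ≤ (l.drop i).length := by simp; omega
      have hpre : m <+: l.drop i := by
        have he := List.prefix_iff_eq_take.mp h
        rw [List.take_append_of_le_length hmlen] at he
        exact he ▸ List.take_prefix _ _
      exact hpre.isInfix.trans (List.drop_suffix i l).isInfix
    · apply hm
      have hlen : l.length - i < m.length := by omega
      have hel := h.getElem hlen
      have hnl : m[l.length - i]'hlen = '\n' := by
        rw [hel, List.getElem_append_right (by simp)]
        simp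
      exact hnl ▸ List.getElem_mem _
  · refine ⟨hi, ?_⟩
    have hdi : (l ++ '\n' :: rest).drop i = rest.drop (i - (l.length + 1)) := by
      have h1 : i - l.length = (i - l.length - 1) + 1 := by omega
      rw [List.drop_append, List.drop_eq_nil_of_le (by omega), h1,
        List.drop_succ_cons, List.nil_append]
      congr 1
    rwa [hdi] at h

lemma pvInfix_iff_drop (m s : List Char) : m <:+: s ↔ ∃ i, m <+: s.drop i := by
  constructor
  · rintro ⟨u, v, rfl⟩
    exact ⟨u.length, by simp⟩
  · rintro ⟨i, t, ht⟩
    exact ⟨s.take i, t, by rw [List.append_assoc, ht, List.take_append_drop]⟩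

lemma pvInfix_shift (m l rest : List Char) (hm : '\n' ∉ m) (hl : ¬ m <:+: l) :
    (m <:+: (l ++ '\n' :: rest)) ↔ m <:+: rest := by
  constructor
  · intro h
    obtain ⟨i, hi⟩ := (pvInfix_iff_drop m _).mp h
    exact (pvInfix_iff_drop m rest).mpr ⟨_, (pvPrefix_cases m l rest hm hl i hi).2⟩
  · intro h
    obtain ⟨i, hi⟩ := (pvInfix_iff_drop m rest).mp h
    refine (pvInfix_iff_drop m _).mpr ⟨l.length + 1 + i, ?_⟩
    have : (l ++ '\n' :: rest).drop (l.length + 1 + i) = rest.drop i := by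
      rw [List.drop_append, List.drop_eq_nil_of_le (by omega), List.nil_append]
      have h1 : l.length + 1 + i - l.length = i + 1 := by omega
      rw [h1, List.drop_succ_cons]
    rwa [this]

lemma pvFind_shift (m l rest : List Char) (hm : '\n' ∉ m) (hl : ¬ m <:+: l)
    (hr : m <:+: rest) :
    PySem.Chars.find (l ++ '\n' :: rest) m = (l.length : Int) + 1 + PySem.Chars.find rest m := by
  have hnn : 0 ≤ PySem.Chars.find rest m := (PySem.Chars.find_nonneg_iff rest m).2 hr
  obtain ⟨hp, hmin⟩ := PySem.Chars.find_spec hnn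
  set k := (PySem.Chars.find rest m).toNat with hkdef
  have hk : PySem.Chars.find rest m = (k : Int) := by omega
  have hkl : k ≤ rest.length := by
    have := PySem.Chars.find_le_length rest m
    omega
  have hmain : PySem.Chars.find (l ++ '\n' :: rest) m = ((l.length + 1 + k : Nat) : Int) := by
    apply pvFind_eq_of
    · have hdi : (l ++ '\n' :: rest).drop (l.length + 1 + k) = rest.drop k := by
        rw [List.drop_append, List.drop_eq_nil_of_le (by omega), List.nil_append]
        have h1 : l.length + 1 + k - l.length = k + 1 := by omega
        rw [h1, List.drop_succ_cons]
      rwa [hdi]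
    · intro i hi hpre
      obtain ⟨hge, hpre'⟩ := pvPrefix_cases m l rest hm hl i hpre
      exact hmin _ (by omega) hpre'
  rw [hmain, hk]
  push_cast
  ring

lemma pvM_nl : '\n' ∉ pvM := by decide

lemma pvM_ne : pvM ≠ [] := by decide

lemma pvDrop_shift (l rest : List Char) (c : Char) (x : Nat) :
    (l ++ c :: rest).drop (l.length + 1 + x) = rest.drop x := by
  rw [List.drop_append, List.drop_eq_nil_of_le (by omega), List.nil_append]
  have h1 : l.length + 1 + x - l.length = x + 1 := by omega
  rw [h1, List.drop_succ_cons]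

-- when the marker occurs in the (newline-free) first line, B's first newline search lands
-- exactly on the newline ending that line
lemma pvB_first_line (l rest : List Char) (hl : '\n' ∉ l) (hM : pvM <:+: l) :
    0 ≤ PySem.Chars.find (l ++ '\n' :: rest) pvM ∧
    PySem.Chars.findFrom (l ++ '\n' :: rest) ['\n']
      (PySem.Chars.find (l ++ '\n' :: rest) pvM) = ((l.length : Nat) : Int) := by
  have hMc : pvM <:+: (l ++ '\n' :: rest) := hM.trans (List.prefix_append l _).isInfix
  have hnn : 0 ≤ PySem.Chars.find (l ++ '\n' :: rest) pvM :=
    (PySem.Chars.find_nonneg_iff _ pvM).2 hMc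
  refine ⟨hnn, ?_⟩
  obtain ⟨hp, hmin⟩ := PySem.Chars.find_spec hnn
  set k := (PySem.Chars.find (l ++ '\n' :: rest) pvM).toNat with hkdef
  have hfk : PySem.Chars.find (l ++ '\n' :: rest) pvM = (k : Int) := by omega
  -- the first occurrence starts inside l
  have hkl : k ≤ l.length := by
    obtain ⟨u, v, huv⟩ := hM
    have hlen := congrArg List.length huv
    simp at hlen
    have hdrop : (l ++ '\n' :: rest).drop u.length = pvM ++ (v ++ '\n' :: rest) := by
      rw [← huv]
      simp only [List.append_assoc]
      rw [List.drop_left]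
    have hu : pvM <+: (l ++ '\n' :: rest).drop u.length := by
      rw [hdrop]; exact List.prefix_append _ _
    have hku : k ≤ u.length := by
      by_contra h'
      exact hmin u.length (by omega) hu
    have := pvM_ne
    have hmlen : 0 < pvM.length := List.length_pos_of_ne_nil pvM_ne
    omega
  have hdropk : (l ++ '\n' :: rest).drop k = l.drop k ++ '\n' :: rest :=
    List.drop_append_of_le_length (by omega)
  have hfind1 : PySem.Chars.find ((l ++ '\n' :: rest).drop k) ['\n'] = ((l.drop k).length : Int) := by
    rw [hdropk]
    exact pvFind_char_append _ _ _ (fun hc => hl (List.mem_of_mem_drop hc))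
  rw [hfk, PySem.Chars.findFrom_natCast _ _ k (by simp; omega), hfind1]
  rw [if_neg (show ¬((l.drop k).length : Int) = -1 by simp)]
  simp
  omega

-- when the (newline-free) first line does not contain the marker, B's whole computation
-- shifts past it
lemma pvBinner_shift (l rest : List Char) (hlnl : '\n' ∉ l) (hMl : ¬ pvM <:+: l)
    (hMr : pvM <:+: rest) :
    pvBinner (l ++ '\n' :: rest) = pvBinner rest := by
  have hfr : 0 ≤ PySem.Chars.find rest pvM := (PySem.Chars.find_nonneg_iff _ _).2 hMr
  set k' := (PySem.Chars.find rest pvM).toNat with hk'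
  have hfrk : PySem.Chars.find rest pvM = (k' : Int) := by omega
  have hk'len : k' ≤ rest.length := by
    have := PySem.Chars.find_le_length rest pvM; omega
  have hshift : PySem.Chars.find (l ++ '\n' :: rest) pvM = ((l.length + 1 + k' : Nat) : Int) := by
    rw [pvFind_shift pvM l rest pvM_nl hMl hMr, hfrk]; push_cast; ring
  have hlen : (l ++ '\n' :: rest).length = l.length + 1 + rest.length := by simp; omega
  have hd1 := pvDrop_shift l rest '\n' k'
  have hff1 := PySem.Chars.findFrom_natCast (l ++ '\n' :: rest) ['\n'] (l.length + 1 + k') (by omega)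
  rw [hd1] at hff1
  have hff1r := PySem.Chars.findFrom_natCast rest ['\n'] k' hk'len
  by_cases hf1 : PySem.Chars.find (rest.drop k') ['\n'] = -1
  · have hnlcs : PySem.Chars.findFrom (l ++ '\n' :: rest) ['\n'] ((l.length + 1 + k' : Nat) : Int) = -1 := by
      rw [hff1, if_pos hf1]
    have hnlr : PySem.Chars.findFrom rest ['\n'] ((k' : Nat) : Int) = -1 := by
      rw [hff1r, if_pos hf1]
    have hL : pvBinner (l ++ '\n' :: rest) = none := by
      rw [pvBinner, hshift, hnlcs,
        if_neg (show ¬((l.length + 1 + k' : Nat) : Int) = -1 by omega), if_pos rfl]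
    have hR : pvBinner rest = none := by
      rw [pvBinner, hfrk, hnlr,
        if_neg (show ¬((k' : Nat) : Int) = -1 by omega), if_pos rfl]
    rw [hL, hR]
  · have hf1nn : 0 ≤ PySem.Chars.find (rest.drop k') ['\n'] := by
      have := PySem.Chars.neg_one_le_find (s := rest.drop k') (sub := ['\n']); omega
    set f1 := (PySem.Chars.find (rest.drop k') ['\n']).toNat with hf1def
    have hf1k : PySem.Chars.find (rest.drop k') ['\n'] = (f1 : Int) := by omega
    set j := k' + f1 with hj
    have hjlt : j < rest.length := by
      obtain ⟨hp, -⟩ := PySem.Chars.find_spec hf1nn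
      have h1 := hp.length_le
      simp at h1
      omega
    have hnlcs : PySem.Chars.findFrom (l ++ '\n' :: rest) ['\n'] ((l.length + 1 + k' : Nat) : Int)
        = ((l.length + 1 + j : Nat) : Int) := by
      rw [hff1, if_neg hf1, hf1k]; push_cast; omega
    have hnlr : PySem.Chars.findFrom rest ['\n'] ((k' : Nat) : Int) = ((j : Nat) : Int) := by
      rw [hff1r, if_neg hf1, hf1k]; omega
    have hcast1 : ((l.length + 1 + j : Nat) : Int) + 1 = ((l.length + 1 + (j + 1) : Nat) : Int) := by
      push_cast; ring
    have hcast2 : ((j : Nat) : Int) + 1 = ((j + 1 : Nat) : Int) := by push_cast; ring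
    have hd2 := pvDrop_shift l rest '\n' (j + 1)
    have hff2 := PySem.Chars.findFrom_natCast (l ++ '\n' :: rest) ['\n'] (l.length + 1 + (j + 1)) (by omega)
    rw [hd2] at hff2
    have hff2r := PySem.Chars.findFrom_natCast rest ['\n'] (j + 1) (by omega)
    by_cases hf2 : PySem.Chars.find (rest.drop (j + 1)) ['\n'] = -1
    · have hecs : PySem.Chars.findFrom (l ++ '\n' :: rest) ['\n'] (((l.length + 1 + j : Nat) : Int) + 1) = -1 := by
        rw [hcast1, hff2, if_pos hf2]
      have her : PySem.Chars.findFrom rest ['\n'] (((j : Nat) : Int) + 1) = -1 := by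
        rw [hcast2, hff2r, if_pos hf2]
      have hs1 : PySem.List.slice (l ++ '\n' :: rest) (some (((l.length + 1 + j : Nat) : Int) + 1)) none
          = rest.drop (j + 1) := by
        rw [hcast1, PySem.List.slice_from _ (by positivity), Int.toNat_natCast]
        exact hd2
      have hs2 : PySem.List.slice rest (some (((j : Nat) : Int) + 1)) none = rest.drop (j + 1) := by
        rw [hcast2, PySem.List.slice_from _ (by positivity), Int.toNat_natCast]
      have hL : pvBinner (l ++ '\n' :: rest) = some (PySem.Chars.strip (rest.drop (j + 1))) := by
        rw [pvBinner, hshift, hnlcs, hecs,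
          if_neg (show ¬((l.length + 1 + k' : Nat) : Int) = -1 by omega),
          if_neg (show ¬((l.length + 1 + j : Nat) : Int) = -1 by omega), if_pos rfl, hs1]
      have hR : pvBinner rest = some (PySem.Chars.strip (rest.drop (j + 1))) := by
        rw [pvBinner, hfrk, hnlr, her,
          if_neg (show ¬((k' : Nat) : Int) = -1 by omega),
          if_neg (show ¬((j : Nat) : Int) = -1 by omega), if_pos rfl, hs2]
      rw [hL, hR]
    · have hf2nn : 0 ≤ PySem.Chars.find (rest.drop (j + 1)) ['\n'] := by
        have := PySem.Chars.neg_one_le_find (s := rest.drop (j + 1)) (sub := ['\n']); omega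
      set f2 := (PySem.Chars.find (rest.drop (j + 1)) ['\n']).toNat with hf2def
      have hf2k : PySem.Chars.find (rest.drop (j + 1)) ['\n'] = (f2 : Int) := by omega
      have hecs : PySem.Chars.findFrom (l ++ '\n' :: rest) ['\n'] (((l.length + 1 + j : Nat) : Int) + 1)
          = ((l.length + 1 + (j + 1) + f2 : Nat) : Int) := by
        rw [hcast1, hff2, if_neg hf2, hf2k]; push_cast; omega
      have her : PySem.Chars.findFrom rest ['\n'] (((j : Nat) : Int) + 1)
          = ((j + 1 + f2 : Nat) : Int) := by
        rw [hcast2, hff2r, if_neg hf2, hf2k]; push_cast; omega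
      have hs1 : PySem.List.slice (l ++ '\n' :: rest) (some (((l.length + 1 + j : Nat) : Int) + 1))
          (some ((l.length + 1 + (j + 1) + f2 : Nat) : Int))
          = (rest.drop (j + 1)).take f2 := by
        rw [hcast1, PySem.List.slice_natCast, hd2]
        congr 1
        omega
      have hs2 : PySem.List.slice rest (some (((j : Nat) : Int) + 1))
          (some ((j + 1 + f2 : Nat) : Int))
          = (rest.drop (j + 1)).take f2 := by
        rw [hcast2, PySem.List.slice_natCast]
        congr 1
        omega
      have hL : pvBinner (l ++ '\n' :: rest) = some (PySem.Chars.strip ((rest.drop (j + 1)).take f2)) := by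
        rw [pvBinner, hshift, hnlcs, hecs,
          if_neg (show ¬((l.length + 1 + k' : Nat) : Int) = -1 by omega),
          if_neg (show ¬((l.length + 1 + j : Nat) : Int) = -1 by omega),
          if_neg (show ¬((l.length + 1 + (j + 1) + f2 : Nat) : Int) = -1 by omega), hs1]
      have hR : pvBinner rest = some (PySem.Chars.strip ((rest.drop (j + 1)).take f2)) := by
        rw [pvBinner, hfrk, hnlr, her,
          if_neg (show ¬((k' : Nat) : Int) = -1 by omega),
          if_neg (show ¬((j : Nat) : Int) = -1 by omega),
          if_neg (show ¬((j + 1 + f2 : Nat) : Int) = -1 by omega), hs2]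
      rw [hL, hR]

-- main char-level lemma
lemma pvMain : ∀ (n : Nat) (cs : List Char), cs.length ≤ n → pvM <:+: cs →
    pvAinner cs = pvBinner cs := by
  intro n
  induction n with
  | zero =>
    intro cs hlen hM
    have hcs : cs = [] := List.eq_nil_of_length_eq_zero (by omega)
    subst hcs
    exact absurd (List.infix_nil.mp hM) pvM_ne
  | succ n ih =>
    intro cs hlen hM
    by_cases hnl : '\n' ∈ cs
    · obtain ⟨l, rest, hcs, hlnl⟩ := List.eq_append_cons_of_mem hnl
      subst hcs
      have hlensum : (l ++ '\n' :: rest).length = l.length + 1 + rest.length := by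
        simp; omega
      by_cases hMl : pvM <:+: l
      · -- the marker occurs in the (newline-free) first line
        obtain ⟨hfnn, hnlval⟩ := pvB_first_line l rest hlnl hMl
        have hisl : PySem.Chars.isIn pvM l = true := (PySem.Chars.isIn_iff_infix _ _).2 hMl
        have hfne : PySem.Chars.find (l ++ '\n' :: rest) pvM =
            ((PySem.Chars.find (l ++ '\n' :: rest) pvM).toNat : Int) := by omega
        have hd0 : (l ++ '\n' :: rest).drop (l.length + 1 + 0) = rest := by
          rw [pvDrop_shift]; rfl
        simp only [Nat.add_zero] at hd0
        have hff2 := PySem.Chars.findFrom_natCast (l ++ '\n' :: rest) ['\n'] (l.length + 1)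
          (by omega)
        rw [hd0] at hff2
        have hcast1 : ((l.length : Nat) : Int) + 1 = ((l.length + 1 : Nat) : Int) := by
          push_cast; ring
        by_cases hrnl : '\n' ∈ rest
        · -- the next line ends at a newline inside rest
          obtain ⟨r0, rest', hr, hr0nl⟩ := List.eq_append_cons_of_mem hrnl
          subst hr
          have hA : pvAinner (l ++ '\n' :: (r0 ++ '\n' :: rest')) =
              some (PySem.Chars.strip r0) := by
            unfold pvAinner
            rw [pvSplit_cons '\n' l _ hlnl, pvSplit_cons '\n' r0 _ hr0nl]
            simp only [List.zip_cons_cons, List.tail_cons]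
            rw [List.find?_cons_of_pos (by simpa using hisl)]
            rfl
          have hfr0 : PySem.Chars.find (r0 ++ '\n' :: rest') ['\n'] = ((r0.length : Nat) : Int) :=
            pvFind_char_append '\n' r0 rest' hr0nl
          have hecs : PySem.Chars.findFrom (l ++ '\n' :: (r0 ++ '\n' :: rest')) ['\n']
              (((l.length : Nat) : Int) + 1) = ((l.length + 1 + r0.length : Nat) : Int) := by
            rw [hcast1, hff2, hfr0, if_neg (by omega)]
            push_cast; ring
          have hs1 : PySem.List.slice (l ++ '\n' :: (r0 ++ '\n' :: rest'))
              (some (((l.length : Nat) : Int) + 1))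
              (some ((l.length + 1 + r0.length : Nat) : Int)) = r0 := by
            rw [hcast1, PySem.List.slice_natCast, hd0]
            have : l.length + 1 + r0.length - (l.length + 1) = r0.length := by omega
            rw [this, List.take_left]
          have hB : pvBinner (l ++ '\n' :: (r0 ++ '\n' :: rest')) =
              some (PySem.Chars.strip r0) := by
            rw [pvBinner, hnlval, hecs, hs1]
            rw [if_neg (show ¬PySem.Chars.find (l ++ '\n' :: (r0 ++ '\n' :: rest')) pvM = -1 by omega),
              if_neg (show ¬((l.length : Nat) : Int) = -1 by omega),
              if_neg (show ¬((l.length + 1 + r0.length : Nat) : Int) = -1 by omega)]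
          rw [hA, hB]
        · -- the marker line is followed by the (newline-free) last line
          have hA : pvAinner (l ++ '\n' :: rest) = some (PySem.Chars.strip rest) := by
            unfold pvAinner
            rw [pvSplit_cons '\n' l _ hlnl, pvSplit_no_sep '\n' rest hrnl]
            simp only [List.zip_cons_cons, List.tail_cons]
            rw [List.find?_cons_of_pos (by simpa using hisl)]
            rfl
          have hecs : PySem.Chars.findFrom (l ++ '\n' :: rest) ['\n']
              (((l.length : Nat) : Int) + 1) = -1 := by
            rw [hcast1, hff2, pvFind_char_none '\n' rest hrnl, if_pos rfl]
          have hs1 : PySem.List.slice (l ++ '\n' :: rest)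
              (some (((l.length : Nat) : Int) + 1)) none = rest := by
            rw [hcast1, PySem.List.slice_from _ (by positivity), Int.toNat_natCast]
            exact hd0
          have hB : pvBinner (l ++ '\n' :: rest) = some (PySem.Chars.strip rest) := by
            rw [pvBinner, hnlval, hecs, hs1]
            rw [if_neg (show ¬PySem.Chars.find (l ++ '\n' :: rest) pvM = -1 by omega),
              if_neg (show ¬((l.length : Nat) : Int) = -1 by omega),
              if_pos rfl]
          rw [hA, hB]
      · -- the first line does not contain the marker: both sides shift past it
        have hMr : pvM <:+: rest := (pvInfix_shift pvM l rest pvM_nl hMl).1 hM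
        have hA : pvAinner (l ++ '\n' :: rest) = pvAinner rest := by
          unfold pvAinner
          rw [pvSplit_cons '\n' l rest hlnl]
          cases hL : PySem.Chars.splitOn rest ['\n'] with
          | nil => simp
          | cons h' t' =>
            simp only [List.zip_cons_cons, List.tail_cons]
            rw [List.find?_cons_of_neg
              (by simp [(PySem.Chars.isIn_eq_false_iff pvM l).2 hMl])]
        rw [hA, pvBinner_shift l rest hlnl hMl hMr]
        exact ih rest (by omega) hMr
    · -- no newline at all: A sees a single line, B finds no newline
      have hA : pvAinner cs = none := by
        unfold pvAinner
        rw [pvSplit_no_sep '\n' cs hnl]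
        simp
      have hfnn : 0 ≤ PySem.Chars.find cs pvM := (PySem.Chars.find_nonneg_iff _ _).2 hM
      have hfk : PySem.Chars.find cs pvM = (((PySem.Chars.find cs pvM).toNat : Nat) : Int) := by
        omega
      have hklen : (PySem.Chars.find cs pvM).toNat ≤ cs.length := by
        have := PySem.Chars.find_le_length cs pvM; omega
      have hB : pvBinner cs = none := by
        rw [pvBinner, hfk,
          PySem.Chars.findFrom_natCast cs ['\n'] (PySem.Chars.find cs pvM).toNat hklen,
          pvFind_char_none '\n' _ (fun hc => hnl (List.mem_of_mem_drop hc)), if_pos rfl]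
        rw [if_neg (by omega), if_pos rfl]
      rw [hA, hB]

-- glue: port A's inner value in terms of pvAinner
lemma pvGlueA (content : String) :
    (match pvLoopA ((PySem.Str.split? content "\n").getD [])
        (PySem.List.enumerate ((PySem.Str.split? content "\n").getD []) 0) with
     | some r => r
     | none => "(No explicit goal defined)") =
    (match pvAinner content.toList with
     | some r => String.ofList r
     | none => "(No explicit goal defined)") := by
  have hlines : (PySem.Str.split? content "\n").getD [] =
      (PySem.Chars.splitOn content.toList ['\n']).map String.ofList := by
    simp [PySem.Str.split?, PySem.Chars.split?]
  rw [hlines]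
  have h0 := pvLoopA_eq_zip ((PySem.Chars.splitOn content.toList ['\n']).map String.ofList) []
  simp only [List.nil_append, List.length_nil, Nat.cast_zero] at h0
  rw [h0]
  unfold pvAinner
  rw [← List.map_tail, List.zip_map, List.find?_map]
  have hpred : ((fun p => PySem.Str.isIn "## Primary Goal" p.1) ∘
      Prod.map String.ofList String.ofList) =
      (fun p : List Char × List Char => PySem.Chars.isIn pvM p.1) := by
    funext q
    simp [PySem.Str.isIn_eq, pvM]
  rw [hpred]
  cases hf : (((PySem.Chars.splitOn content.toList ['\n']).zip
      (PySem.Chars.splitOn content.toList ['\n']).tail).find?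
      (fun p : List Char × List Char => PySem.Chars.isIn pvM p.1)) with
  | none => rfl
  | some q =>
    simp only [Option.map_some]
    exact String.toList_inj.mp (by simp)

-- glue: port B's inner value in terms of pvBinner
lemma pvGlueB (content : String) (h : PySem.Str.find content "## Primary Goal" ≠ -1) :
    (let p := PySem.Str.find content "## Primary Goal"
     let nl := PySem.Str.findFrom content "\n" p
     if nl ≠ -1 then
       let e := PySem.Str.findFrom content "\n" (nl + 1)
       PySem.Str.strip
         (if e = -1 then PySem.Str.slice content (some (nl + 1)) none
          else PySem.Str.slice content (some (nl + 1)) (some e))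
     else "(No explicit goal defined)") =
    (match pvBinner content.toList with
     | some r => String.ofList r
     | none => "(No explicit goal defined)") := by
  simp only [PySem.Str.find_eq, PySem.Str.findFrom_eq,
    (show "\n".toList = ['\n'] from rfl),
    (show "## Primary Goal".toList = pvM from rfl)] at h ⊢
  rw [pvBinner, if_neg h]
  by_cases h2 : PySem.Chars.findFrom content.toList ['\n']
      (PySem.Chars.find content.toList pvM) = -1
  · rw [if_neg (not_not_intro h2), if_pos h2]
  · rw [if_pos h2, if_neg h2]
    by_cases h3 : PySem.Chars.findFrom content.toList ['\n']
        (PySem.Chars.findFrom content.toList ['\n']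
          (PySem.Chars.find content.toList pvM) + 1) = -1
    · rw [if_pos h3, if_pos h3]
      exact String.toList_inj.mp (by simp)
    · rw [if_neg h3, if_neg h3]
      exact String.toList_inj.mp (by simp)

lemma pvInnerEq (content : String) :
    (if PySem.Str.isIn "## Primary Goal" content then
      (match pvLoopA ((PySem.Str.split? content "\n").getD [])
          (PySem.List.enumerate ((PySem.Str.split? content "\n").getD []) 0) with
       | some r => r
       | none => "(No explicit goal defined)")
     else "(No explicit goal defined)") =
    (let p := PySem.Str.find content "## Primary Goal"
     if p ≠ -1 then
       let nl := PySem.Str.findFrom content "\n" p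
       if nl ≠ -1 then
         let e := PySem.Str.findFrom content "\n" (nl + 1)
         PySem.Str.strip
           (if e = -1 then PySem.Str.slice content (some (nl + 1)) none
            else PySem.Str.slice content (some (nl + 1)) (some e))
       else "(No explicit goal defined)"
     else "(No explicit goal defined)") := by
  by_cases hin : PySem.Str.isIn "## Primary Goal" content = true
  · have hM : pvM <:+: content.toList := by
      have := (PySem.Str.isIn_iff_infix "## Primary Goal" content).mp hin
      exact this
    have hfind : PySem.Str.find content "## Primary Goal" ≠ -1 := by
      rw [PySem.Str.find_ne_neg_one_iff]
      exact hM
    rw [if_pos hin, if_pos hfind, pvGlueA content, pvGlueB content hfind,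
      pvMain content.toList.length content.toList le_rfl hM]
  · have hnM : ¬ pvM <:+: content.toList := by
      intro hc
      exact hin ((PySem.Str.isIn_iff_infix "## Primary Goal" content).mpr hc)
    have hfind : PySem.Str.find content "## Primary Goal" = -1 := by
      rw [PySem.Str.find_eq_neg_one_iff]
      exact hnM
    rw [if_neg hin, if_neg (not_not_intro hfind)]

-- ===== VERDICT (by name: the statement is the Claim_ definition above) =====
theorem get_node_goal_spec : Claim_equal_get_node_goal := by
  intro node _
  unfold Spec_get_node_goal get_node_goal get_node_goal_alt
  simp only
  exact if_congr Iff.rfl rfl (pvInnerEq _)
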